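-- pv_equiv track=rewrite | github.com/Diogo1457/Wikipedia_Search | wikepedia.py | filterHTMLTags
-- ===== SOURCE A (Python) =====
-- def filterHTMLTags(content_parg):
--     content = ""
--     cont = 0
--     for c in content_parg:
--         if cont >= len(content_parg): # Filtrar mais
--             break
--         close_tag = content_parg.find(">", cont) + 1
--         open_tag = content_parg.find("<", close_tag)
--         content += content_parg[close_tag:open_tag:1]
--         cont = close_tag + 2
--     return content
-- ===== SOURCE B (Python) =====
-- def filterHTMLTags(content_parg):
--     n = len(content_parg)
--     # next occurrence index arrays, filled right-to-left: next_gt[i] = first '>' at index >= i (or -1)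
--     next_gt = [-1] * (n + 1)
--     next_lt = [-1] * (n + 1)
--     for i in range(n - 1, -1, -1):
--         next_gt[i] = i if content_parg[i] == '>' else next_gt[i + 1]
--         next_lt[i] = i if content_parg[i] == '<' else next_lt[i + 1]
--     parts = []
--     cont = 0
--     for _ in range(n):
--         if cont >= n:
--             break
--         close_tag = next_gt[cont] + 1
--         open_tag = next_lt[close_tag]
--         parts.append(content_parg[close_tag:open_tag])
--         cont = close_tag + 2
--     return "".join(parts)
-- ===== Notes on version B (the rewrite author's own statement) =====
-- stated objective: alternative
-- what changed: Replaces A's repeated str.find scans inside the loop by next-'>' and next-'<' index arrays precomputed once right-to-left (O(1) lookups), and accumulates the kept slices in a list joined once at the end instead of repeated string concatenation; measured cost is similar since both are dominated by building the output.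
import Mathlib
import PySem

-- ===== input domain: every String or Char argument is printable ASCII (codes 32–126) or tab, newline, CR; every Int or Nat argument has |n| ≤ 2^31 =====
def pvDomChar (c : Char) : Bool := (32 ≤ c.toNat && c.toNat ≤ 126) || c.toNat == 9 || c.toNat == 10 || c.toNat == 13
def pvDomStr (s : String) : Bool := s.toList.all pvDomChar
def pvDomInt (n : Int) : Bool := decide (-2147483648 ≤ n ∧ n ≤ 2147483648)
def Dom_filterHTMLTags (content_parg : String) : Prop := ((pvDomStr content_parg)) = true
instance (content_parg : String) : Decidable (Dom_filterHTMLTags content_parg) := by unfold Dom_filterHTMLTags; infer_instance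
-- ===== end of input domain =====

-- B replaces A's repeated str.find scans by next-'>'/next-'<' index arrays precomputed
-- right-to-left once, and accumulates the kept pieces in a list joined at the end.

-- ===== PORT A =====
-- the 'for c in content_parg' loop of A: the character is ignored, the list is the fuel
def pvLoopA (cs : List Char) (fuel : List Char) (content : List Char) (cont : Int) : List Char :=
  match fuel with
  | [] => content
  | _ :: rest =>
    if cont ≥ (cs.length : Int) then content
    else
      let close_tag := PySem.Chars.findFrom cs ['>'] cont none + 1
      let open_tag := PySem.Chars.findFrom cs ['<'] close_tag none
      pvLoopA cs rest (content ++ PySem.Chars.slice cs (some close_tag) (some open_tag)) (close_tag + 2)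

def filterHTMLTags (content_parg : String) : String :=
  String.ofList (pvLoopA content_parg.toList content_parg.toList [] 0)

-- ===== PORT B =====
-- Source B's right-to-left fill of the next-occurrence array: cell i is i if the char matches,
-- else the already-filled cell i+1 (the head of the recursive result); last cell is -1.
def pvNexts (ch : Char) (i : Int) : List Char → List Int
  | [] => [-1]
  | c :: rest =>
    let r := pvNexts ch (i + 1) rest
    (if c == ch then i else r.headD (-1)) :: r

-- Source B's 'for _ in range(n)' loop; array indexing is always in range, ported as pyGetD
def pvLoopB (cs : List Char) (gt lt : List Int) (k : Nat) (parts : List (List Char)) (cont : Int) : List (List Char) :=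
  match k with
  | 0 => parts
  | k + 1 =>
    if cont ≥ (cs.length : Int) then parts
    else
      let close_tag := PySem.List.pyGetD gt cont (-1) + 1
      let open_tag := PySem.List.pyGetD lt close_tag (-1)
      pvLoopB cs gt lt k (parts ++ [PySem.Chars.slice cs (some close_tag) (some open_tag)]) (close_tag + 2)

def filterHTMLTags_alt (content_parg : String) : String :=
  let cs := content_parg.toList
  let gt := pvNexts '>' 0 cs
  let lt := pvNexts '<' 0 cs
  String.ofList (PySem.Chars.join [] (pvLoopB cs gt lt cs.length [] 0))

-- ===== PRECONDITION & SPEC =====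
def Spec_filterHTMLTags (content_parg : String) (out : String) : Prop := out = filterHTMLTags_alt content_parg
instance (content_parg : String) (out : String) : Decidable (Spec_filterHTMLTags content_parg out) := by unfold Spec_filterHTMLTags; infer_instance

-- ===== CLAIM (what is proved, stated in full; the proofs are below) =====
def Claim_equal_filterHTMLTags : Prop := ∀ (content_parg : String), Dom_filterHTMLTags content_parg → Spec_filterHTMLTags content_parg (filterHTMLTags content_parg)

-- ===== LEMMAS AND PROOFS =====

-- Chars.find with a single-character needle is first-index search
theorem pvFind_go_single (ch : Char) (l : List Char) (k : Nat) :
    PySem.Chars.find.go [ch] l k =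
      match l.findIdx? (· == ch) with
      | none => -1
      | some m => ((k + m : Nat) : Int) := by
  induction l generalizing k with
  | nil => simp [PySem.Chars.find.go]
  | cons c t ih =>
    simp only [PySem.Chars.find.go, List.findIdx?_cons]
    by_cases h : c = ch
    · simp [h, List.isPrefixOf]
    · have hb : (c == ch) = false := by simp [h]
      have hb' : (ch == c) = false := by simp [Ne.symm h]
      simp only [List.isPrefixOf, hb', Bool.false_and, hb, ih (k + 1)]
      cases t.findIdx? (· == ch) with
      | none => simp
      | some m => simp; ring

theorem pvFind_single (ch : Char) (l : List Char) :
    PySem.Chars.find l [ch] =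
      match l.findIdx? (· == ch) with
      | none => -1
      | some m => (m : Int) := by
  have := pvFind_go_single ch l 0
  simpa [PySem.Chars.find] using this

theorem pvNexts_length (ch : Char) (i : Int) (l : List Char) :
    (pvNexts ch i l).length = l.length + 1 := by
  induction l generalizing i with
  | nil => simp [pvNexts]
  | cons c t ih => simp [pvNexts, ih]

-- cell j of the array built from offset `base` is the first match index in l.drop j, shifted
theorem pvNexts_getD (ch : Char) (base : Int) (l : List Char) (j : Nat) (hj : j ≤ l.length) :
    (pvNexts ch base l).getD j (-1) =
      match (l.drop j).findIdx? (· == ch) with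
      | none => -1
      | some m => base + j + m := by
  induction l generalizing base j with
  | nil =>
    simp only [List.length_nil, Nat.le_zero] at hj
    subst hj
    simp [pvNexts]
  | cons c t ih =>
    cases j with
    | zero =>
      by_cases h : c = ch
      · simp [pvNexts, h, List.findIdx?_cons]
      · have hb : (c == ch) = false := by simp [h]
        have hne : pvNexts ch (base + 1) t ≠ [] := by
          intro hcon
          have := pvNexts_length ch (base + 1) t
          simp [hcon] at this
        have hhead : (pvNexts ch (base + 1) t).headD (-1)
            = (pvNexts ch (base + 1) t).getD 0 (-1) := by
          cases hx : pvNexts ch (base + 1) t with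
          | nil => exact absurd hx hne
          | cons a r => simp
        simp only [pvNexts, List.getD_cons_zero, hhead,
          ih (base + 1) 0 (by omega), List.drop_zero, List.findIdx?_cons, hb]
        cases t.findIdx? (· == ch) with
        | none => simp
        | some m => simp; ring
    | succ j =>
      have := ih (base + 1) j (by simpa using hj)
      simp only [pvNexts, List.getD_cons_succ, this, List.drop_succ_cons]
      cases (t.drop j).findIdx? (· == ch) with
      | none => simp
      | some m => simp; ring

-- the array lookup agrees with Python's str.find(sub, start) for 0 ≤ start ≤ len
theorem pvLookup_eq_findFrom (ch : Char) (cs : List Char) (i : Int)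
    (h0 : 0 ≤ i) (hn : i ≤ (cs.length : Int)) :
    PySem.List.pyGetD (pvNexts ch 0 cs) i (-1) = PySem.Chars.findFrom cs [ch] i none := by
  obtain ⟨k, rfl⟩ : ∃ k : Nat, i = (k : Int) := ⟨i.toNat, (Int.toNat_of_nonneg h0).symm⟩
  have hk : k ≤ cs.length := by exact_mod_cast hn
  rw [PySem.List.pyGetD_of_nonneg _ _ h0, PySem.Chars.findFrom_natCast cs [ch] k hk,
    pvFind_single]
  simp only [Int.toNat_natCast]
  rw [pvNexts_getD ch 0 cs k hk]
  cases (cs.drop k).findIdx? (· == ch) with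
  | none => simp
  | some m => simp

-- bounds of findFrom via the same characterisation
theorem pvFindFrom_bounds (ch : Char) (cs : List Char) (i : Int)
    (h0 : 0 ≤ i) (hn : i ≤ (cs.length : Int)) :
    -1 ≤ PySem.Chars.findFrom cs [ch] i none ∧
      PySem.Chars.findFrom cs [ch] i none < (cs.length : Int) ∨
      PySem.Chars.findFrom cs [ch] i none = -1 := by
  obtain ⟨k, rfl⟩ : ∃ k : Nat, i = (k : Int) := ⟨i.toNat, (Int.toNat_of_nonneg h0).symm⟩
  have hk : k ≤ cs.length := by exact_mod_cast hn
  rw [PySem.Chars.findFrom_natCast cs [ch] k hk, pvFind_single]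
  cases hf : (cs.drop k).findIdx? (· == ch) with
  | none => simp
  | some m =>
    left
    have hm : m < (cs.drop k).length := (List.findIdx?_eq_some_iff_findIdx_eq.mp hf).1
    rw [List.length_drop] at hm
    have hne : ((m : Int)) ≠ -1 := by omega
    simp only [hne, if_false]
    constructor <;> omega

theorem pvJoin_nil_flatten (parts : List (List Char)) :
    PySem.Chars.join [] parts = parts.flatten := by
  induction parts with
  | nil => rw [PySem.Chars.join_nil, List.flatten_nil]
  | cons a t ih =>
    cases t with
    | nil => rw [PySem.Chars.join_singleton]; simp
    | cons b r => rw [PySem.Chars.join_cons_cons]; simp_all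

theorem pvJoin_nil_append (parts : List (List Char)) (p : List Char) :
    PySem.Chars.join [] (parts ++ [p]) = PySem.Chars.join [] parts ++ p := by
  simp [pvJoin_nil_flatten]

-- the two loops agree step by step: same guard, same indices (array lookup = find),
-- same slice; A's string accumulator is the join of B's parts accumulator
theorem pvLoop_eq (cs : List Char) (fuel : List Char) (parts : List (List Char)) (cont : Int)
    (h0 : 0 ≤ cont) :
    pvLoopA cs fuel (PySem.Chars.join [] parts) cont =
      PySem.Chars.join [] (pvLoopB cs (pvNexts '>' 0 cs) (pvNexts '<' 0 cs) fuel.length parts cont) := by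
  induction fuel generalizing parts cont with
  | nil => simp [pvLoopA, pvLoopB]
  | cons c rest ih =>
    simp only [pvLoopA, pvLoopB, List.length_cons]
    by_cases hg : cont ≥ (cs.length : Int)
    · simp [hg]
    · have hlt : cont < (cs.length : Int) := lt_of_not_ge hg
      have hgt := pvLookup_eq_findFrom '>' cs cont h0 (le_of_lt hlt)
      have hfb := pvFindFrom_bounds '>' cs cont h0 (le_of_lt hlt)
      set f := PySem.Chars.findFrom cs ['>'] cont none with hf
      have hclose0 : 0 ≤ f + 1 := by rcases hfb with ⟨h1, _⟩ | h1 <;> omega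
      have hclosen : f + 1 ≤ (cs.length : Int) := by
        rcases hfb with ⟨_, h2⟩ | h2
        · omega
        · rw [h2]; omega
      have hlt' := pvLookup_eq_findFrom '<' cs (f + 1) hclose0 hclosen
      simp only [if_neg hg, hgt, hlt', ← pvJoin_nil_append]
      exact ih (parts ++ [_]) (f + 1 + 2) (by omega)

-- ===== VERDICT (by name: the statement is the Claim_ definition above) =====
theorem filterHTMLTags_spec : Claim_equal_filterHTMLTags := by
  intro s _
  show filterHTMLTags s = filterHTMLTags_alt s
  unfold filterHTMLTags filterHTMLTags_alt
  have h := pvLoop_eq s.toList s.toList [] 0 (le_refl 0)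
  rw [PySem.Chars.join_nil] at h
  rw [h]
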